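-- pv_equiv track=rewrite | github.com/nlutala/data-structures-and-algorithms-gg | dsa_problems/heaps/level1/min_product_of_k_int.py | min_product
-- ===== SOURCE A (Python) =====
-- def min_product(arr: list[int], k: int) -> int:
--     """
--     Given an array of n positive integers. We are required to write a program
--     to print the minimum product of k integers of the given array.\n
--
--     :param - arr (list of integers)\n
--     :param - k (an integer)\n
--
--     Retuns the product of the two smallest element in the given array.
--     """
--
--     # How I would implement this using a heap (min heap)
--     # It's a bit long, but I hope this makes sense
--     class Node:
--         def __init__(self, val: int, left: object, right: object):
--             """
--             Node constructor\n
--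
--             :param - val (integer of the node)\n
--             :param - left (another node, with a value, left and right node,
--             can be None)\n
--             :param - right (another node, with a value, left and right node,
--             can be None)\n
--             """
--             self.val = val
--             self.left = left
--             self.right = right
--
--         def setLeft(self, node: object):
--             """
--             Update the left value of the node.\n
--
--             :param - node (another node object)
--             """
--             self.left = node
--
--         def setRight(self, node: object):
--             """
--             Update the right value of the node.\n
--
--             :param - node (another node object)
--             """
--             self.left = node
--
--         def addNode(self, node: object):
--             """
--             Add node based on it's value.\n
--
--             :param - node (another node object)
--             """
--             if self.val > node.val:
--                 if self.left is None:
--                     self.left = node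
--                 else:
--                     return self.left.addNode(node)
--             elif self.val <= node.val:
--                 if self.right is None:
--                     self.right = node
--                 else:
--                     return self.right.addNode(node)
--
--     root = Node(arr[0], None, None)
--
--     for i in range(1, len(arr)):
--         root.addNode(Node(arr[i], None, None))
--
--     sorted_elems = []
--     visited_nodes = []  # Stack - to keep track of parent nodes
--     current_node = root
--
--     for i in range(0, k):
--         while current_node is not None:
--             visited_nodes.append(current_node)
--             current_node = current_node.left
--
--         parent = visited_nodes.pop()
--         sorted_elems.append(parent.val)
--         current_node = parent.right
--
--     product = 1
--
--     for elem in sorted_elems: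
--         product *= elem
--
--     return product
-- ===== SOURCE B (Python) =====
-- def min_product(arr: list[int], k: int) -> int:
--     s = sorted(arr)
--     product = 1
--     for i in range(k):
--         product *= s[i]
--     return product
-- ===== Notes on version B (the rewrite author's own statement) =====
-- stated objective: faster
-- what changed: Replaces the hand-rolled BST (Node class, insert recursion, explicit traversal stack) with a builtin sort followed by one flat index loop multiplying the first k elements.
import Mathlib
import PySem

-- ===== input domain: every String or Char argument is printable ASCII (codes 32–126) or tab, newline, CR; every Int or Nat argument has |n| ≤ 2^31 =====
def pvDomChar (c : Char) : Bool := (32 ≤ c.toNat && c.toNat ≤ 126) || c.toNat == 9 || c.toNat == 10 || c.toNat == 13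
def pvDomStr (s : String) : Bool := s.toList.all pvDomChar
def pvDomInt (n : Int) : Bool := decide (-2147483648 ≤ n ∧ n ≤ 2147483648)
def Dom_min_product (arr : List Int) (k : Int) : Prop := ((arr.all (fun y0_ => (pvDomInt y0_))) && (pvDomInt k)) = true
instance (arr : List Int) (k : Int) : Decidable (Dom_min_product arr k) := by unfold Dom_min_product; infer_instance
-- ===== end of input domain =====

-- B replaces A's hand-rolled BST + stack traversal with a builtin sort and one flat index
-- loop over the first k elements, avoiding the BST's quadratic degeneration (objective: faster).


-- ===== PORT A =====
-- Node objects: val/left/right, None children = leaf.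
inductive PvTree : Type where
  | leaf : PvTree
  | node : Int → PvTree → PvTree → PvTree
deriving DecidableEq, Repr

-- Node.addNode: go left when self.val > node.val, else right; 'left is None' = leaf case.
def pvAddNode : PvTree → Int → PvTree
  | .leaf, v => .node v .leaf .leaf
  | .node x l r, v =>
      if x > v then .node x (pvAddNode l v) r else .node x l (pvAddNode r v)

-- the 'while current_node is not None' loop: push the left spine; a stack entry keeps the
-- popped node's (val, right) — exactly the fields A reads after the pop.
def pvPushLeft : PvTree → List (Int × PvTree) → List (Int × PvTree)
  | .leaf, st => st
  | .node v l r, st => pvPushLeft l ((v, r) :: st)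

-- the 'for i in range(0, k)' loop: push left spine, pop, record val, move to right child.
def pvTraverse : Nat → PvTree → List (Int × PvTree) → List Int → List Int
  | 0, _, _, acc => acc
  | n + 1, cur, st, acc =>
      match pvPushLeft cur st with
      | [] => acc                -- Python: visited_nodes.pop() raises IndexError (outside Pre_)
      | (v, r) :: rest => pvTraverse n r rest (acc ++ [v])

def min_product (arr : List Int) (k : Int) : Int :=
  match arr with
  | [] => 0                      -- Python: arr[0] raises IndexError (outside Pre_)
  | a :: rest =>
      let root := rest.foldl (fun t x => pvAddNode t x) (.node a .leaf .leaf)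
      let sorted_elems := pvTraverse k.toNat root [] []
      sorted_elems.foldl (fun p e => p * e) 1

-- ===== PORT B =====
def min_product_alt (arr : List Int) (k : Int) : Int :=
  let s := PySem.List.sorted arr (fun x => x) false
  (PySem.List.pyRange 0 k 1).foldl (fun p i => p * PySem.List.pyGetD s i 1) 1
  -- s[i]: in-range under Pre_; pyGetD's default is never read there

-- ===== PRECONDITION & SPEC =====
-- Pre_ excludes exactly the inputs on which A raises IndexError: empty arr (unconditional
-- arr[0]) and k > len(arr) (pop from an exhausted traversal stack).
def Pre_min_product (arr : List Int) (k : Int) : Prop := arr ≠ [] ∧ k ≤ arr.length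
instance (arr : List Int) (k : Int) : Decidable (Pre_min_product arr k) := by unfold Pre_min_product; infer_instance
def pvWitness_min_product : List Int × Int := ([3, 1, 2], 2)

def Spec_min_product (arr : List Int) (k : Int) (out : Int) : Prop := out = min_product_alt arr k
instance (arr : List Int) (k : Int) (out : Int) : Decidable (Spec_min_product arr k out) := by unfold Spec_min_product; infer_instance

-- ===== CLAIM (what is proved, stated in full; the proofs are below) =====
def Claim_equal_min_product : Prop := ∀ (arr : List Int) (k : Int), Dom_min_product arr k → Pre_min_product arr k → Spec_min_product arr k (min_product arr k)

-- ===== LEMMAS AND PROOFS =====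

def pvInorder : PvTree → List Int
  | .leaf => []
  | .node v l r => pvInorder l ++ v :: pvInorder r

-- insertion into a list before the first strictly greater element (A's BST insert order)
def pvIns (v : Int) : List Int → List Int
  | [] => [v]
  | x :: xs => if x > v then v :: x :: xs else x :: pvIns v xs

def pvBST : PvTree → Prop
  | .leaf => True
  | .node x l r => pvBST l ∧ pvBST r ∧ (∀ u ∈ pvInorder l, u < x) ∧ (∀ u ∈ pvInorder r, x ≤ u)

theorem pv_mem_inorder_addNode (t : PvTree) (v u : Int)
    (h : u ∈ pvInorder (pvAddNode t v)) : u ∈ pvInorder t ∨ u = v := by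
  induction t with
  | leaf => simp [pvAddNode, pvInorder] at h; tauto
  | node x l r ihl ihr =>
      simp only [pvAddNode] at h
      by_cases hx : x > v
      · simp only [if_pos hx, pvInorder, List.mem_append, List.mem_cons] at h ⊢
        rcases h with h | h | h
        · rcases ihl h with h' | h' <;> tauto
        · tauto
        · tauto
      · simp only [if_neg hx, pvInorder, List.mem_append, List.mem_cons] at h ⊢
        rcases h with h | h | h
        · tauto
        · tauto
        · rcases ihr h with h' | h' <;> tauto

theorem pv_addNode_BST (t : PvTree) (v : Int) (h : pvBST t) : pvBST (pvAddNode t v) := by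
  induction t with
  | leaf => simp [pvAddNode, pvBST, pvInorder]
  | node x l r ihl ihr =>
      obtain ⟨hl, hr, hlb, hrb⟩ := h
      simp only [pvAddNode]
      by_cases hx : x > v
      · simp only [if_pos hx, pvBST]
        refine ⟨ihl hl, hr, ?_, hrb⟩
        intro u hu
        rcases pv_mem_inorder_addNode l v u hu with h' | h'
        · exact hlb u h'
        · omega
      · simp only [if_neg hx, pvBST]
        refine ⟨hl, ihr hr, hlb, ?_⟩
        intro u hu
        rcases pv_mem_inorder_addNode r v u hu with h' | h'
        · exact hrb u h'
        · omega

theorem pv_pvIns_append_gt (v x : Int) (R : List Int) (hx : x > v) :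
    ∀ L : List Int, pvIns v (L ++ x :: R) = pvIns v L ++ x :: R := by
  intro L
  induction L with
  | nil => simp [pvIns, hx]
  | cons h tl ih =>
      by_cases hh : h > v
      · simp [pvIns, hh]
      · simp [pvIns, hh, ih]

theorem pv_pvIns_append_le (v x : Int) (R : List Int) (hx : ¬ x > v) :
    ∀ L : List Int, (∀ u ∈ L, ¬ u > v) → pvIns v (L ++ x :: R) = L ++ x :: pvIns v R := by
  intro L
  induction L with
  | nil => intro _; simp [pvIns, hx]
  | cons h tl ih =>
      intro hL
      have hh : ¬ h > v := hL h (by simp)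
      simp only [List.cons_append, pvIns, if_neg hh, List.cons.injEq, true_and]
      exact ih (fun u hu => hL u (by simp [hu]))

theorem pv_inorder_addNode (t : PvTree) (v : Int) (h : pvBST t) :
    pvInorder (pvAddNode t v) = pvIns v (pvInorder t) := by
  induction t with
  | leaf => simp [pvAddNode, pvInorder, pvIns]
  | node x l r ihl ihr =>
      obtain ⟨hl, hr, hlb, hrb⟩ := h
      simp only [pvAddNode]
      by_cases hx : x > v
      · simp only [if_pos hx, pvInorder, ihl hl]
        rw [pv_pvIns_append_gt v x (pvInorder r) hx]
      · simp only [if_neg hx, pvInorder, ihr hr]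
        rw [pv_pvIns_append_le v x (pvInorder r) hx]
        intro u hu
        have := hlb u hu
        omega

theorem pv_pvIns_perm (v : Int) (L : List Int) : (pvIns v L).Perm (v :: L) := by
  induction L with
  | nil => simp [pvIns]
  | cons h tl ih =>
      by_cases hh : h > v
      · simp [pvIns, hh]
      · simp only [pvIns, if_neg hh]
        exact (List.Perm.cons h ih).trans (List.Perm.swap v h tl)

theorem pv_pvIns_pairwise (v : Int) (L : List Int) (h : L.Pairwise (· ≤ ·)) :
    (pvIns v L).Pairwise (· ≤ ·) := by
  induction L with
  | nil => simp [pvIns]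
  | cons x tl ih =>
      rcases List.pairwise_cons.mp h with ⟨hx, htl⟩
      by_cases hh : x > v
      · simp only [pvIns, if_pos hh]
        refine List.pairwise_cons.mpr ⟨?_, h⟩
        intro u hu
        rcases List.mem_cons.mp hu with rfl | hu
        · omega
        · have := hx u hu; omega
      · simp only [pvIns, if_neg hh]
        refine List.pairwise_cons.mpr ⟨?_, ih htl⟩
        intro u hu
        rcases List.mem_cons.mp ((pv_pvIns_perm v tl).mem_iff.mp hu) with rfl | hu
        · omega
        · exact hx u hu

theorem pv_foldl_addNode (xs : List Int) : ∀ t : PvTree, pvBST t →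
    pvBST (xs.foldl (fun t x => pvAddNode t x) t) ∧
    pvInorder (xs.foldl (fun t x => pvAddNode t x) t) =
      xs.foldl (fun l x => pvIns x l) (pvInorder t) := by
  induction xs with
  | nil => intro t ht; exact ⟨ht, rfl⟩
  | cons x tl ih =>
      intro t ht
      simp only [List.foldl_cons]
      rcases ih (pvAddNode t x) (pv_addNode_BST t x ht) with ⟨h1, h2⟩
      exact ⟨h1, by rw [h2, pv_inorder_addNode t x ht]⟩

theorem pv_foldl_pvIns (xs : List Int) : ∀ L : List Int, L.Pairwise (· ≤ ·) →
    (xs.foldl (fun l x => pvIns x l) L).Pairwise (· ≤ ·) ∧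
    (xs.foldl (fun l x => pvIns x l) L).Perm (L ++ xs) := by
  induction xs with
  | nil => intro L hL; exact ⟨hL, by simp⟩
  | cons x tl ih =>
      intro L hL
      simp only [List.foldl_cons]
      rcases ih (pvIns x L) (pv_pvIns_pairwise x L hL) with ⟨h1, h2⟩
      refine ⟨h1, h2.trans ?_⟩
      exact ((pv_pvIns_perm x L).append_right tl).trans List.perm_middle.symm

def pvRest : List (Int × PvTree) → List Int
  | [] => []
  | (v, r) :: st => v :: pvInorder r ++ pvRest st

theorem pv_pushLeft_rest (t : PvTree) : ∀ st, pvRest (pvPushLeft t st) = pvInorder t ++ pvRest st := by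
  induction t with
  | leaf => intro st; simp [pvPushLeft, pvInorder]
  | node v l r ihl ihr =>
      intro st
      simp [pvPushLeft, pvInorder, ihl, pvRest]

theorem pv_traverse_eq (n : Nat) : ∀ (cur : PvTree) (st : List (Int × PvTree)) (acc : List Int),
    pvTraverse n cur st acc = acc ++ (pvInorder cur ++ pvRest st).take n := by
  induction n with
  | zero => intro cur st acc; simp [pvTraverse]
  | succ n ih =>
      intro cur st acc
      have hrest := pv_pushLeft_rest cur st
      cases hpl : pvPushLeft cur st with
      | nil =>
          rw [hpl] at hrest
          simp only [pvRest] at hrest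
          simp [pvTraverse, hpl, ← hrest]
      | cons p rest =>
          obtain ⟨v, r⟩ := p
          rw [hpl] at hrest
          simp only [pvRest] at hrest
          have hstep : pvTraverse (n + 1) cur st acc = pvTraverse n r rest (acc ++ [v]) := by
            simp [pvTraverse, hpl]
          rw [hstep, ih r rest (acc ++ [v]), ← hrest]
          simp

theorem pv_range_prod (S : List Int) : ∀ (m : Nat), m ≤ S.length → ∀ (init : Int),
    (PySem.List.pyRange 0 (m : Int) 1).foldl (fun p i => p * PySem.List.pyGetD S i 1) init =
      (S.take m).foldl (fun p e => p * e) init := by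
  intro m
  induction m with
  | zero => intro _ init; simp [PySem.List.pyRange_one_eq_nil]
  | succ m ih =>
      intro hm init
      have h1 : ((m + 1 : Nat) : Int) = (m : Int) + 1 := by push_cast; ring
      rw [h1, PySem.List.pyRange_one_succ_right (by positivity)]
      rw [List.foldl_append, ih (by omega) init]
      have hm' : m < S.length := by omega
      have ht : List.take (m + 1) S = List.take m S ++ [S[m]] := by
        rw [List.take_add_one, List.getElem?_eq_getElem hm']
        rfl
      rw [ht, List.foldl_append]
      simp [PySem.List.pyGetD_natCast, List.getD, List.getElem?_eq_getElem hm']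

-- ===== VERDICT (by name: the statement is the Claim_ definition above) =====
theorem min_product_spec : Claim_equal_min_product := by
  intro arr k _ hpre
  obtain ⟨hne, hk⟩ := hpre
  cases arr with
  | nil => exact absurd rfl hne
  | cons a rest =>
      have hbst0 : pvBST (PvTree.node a .leaf .leaf) := by
        simp [pvBST, pvInorder]
      obtain ⟨hbst, hino⟩ := pv_foldl_addNode rest (PvTree.node a .leaf .leaf) hbst0
      obtain ⟨hpair, hperm⟩ := pv_foldl_pvIns rest [a] (by simp)
      have hin0 : pvInorder (PvTree.node a .leaf .leaf) = [a] := rfl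
      rw [hin0] at hino
      rw [← hino] at hpair hperm
      have hperm' : (pvInorder (rest.foldl (fun t x => pvAddNode t x) (PvTree.node a .leaf .leaf))).Perm (a :: rest) := by
        simpa using hperm
      have hsorted : PySem.List.sorted (a :: rest) (fun x => x) false =
          pvInorder (rest.foldl (fun t x => pvAddNode t x) (PvTree.node a .leaf .leaf)) :=
        PySem.List.sorted_id_eq_of_perm_of_pairwise _ _ hperm' hpair
      have hlen : (pvInorder (rest.foldl (fun t x => pvAddNode t x) (PvTree.node a .leaf .leaf))).length
          = (a :: rest).length := hperm'.length_eq
      show Spec_min_product (a :: rest) k (min_product (a :: rest) k)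
      unfold Spec_min_product min_product min_product_alt
      simp only []
      rw [pv_traverse_eq, hsorted]
      simp only [pvRest, List.append_nil, List.nil_append]
      by_cases hk0 : k ≤ 0
      · rw [PySem.List.pyRange_one_eq_nil hk0]
        have : k.toNat = 0 := by omega
        simp [this]
      · have hcast : ((k.toNat : Nat) : Int) = k := Int.toNat_of_nonneg (by omega)
        rw [← hcast]
        refine (pv_range_prod _ k.toNat ?_ 1).symm
        have := hk
        simp only [List.length_cons] at this hlen
        omega
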